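-- pv_equiv track=rewrite | github.com/alessiovignoli/TANGO1 | scripts/extract_seqs.py | read_seqs
-- ===== SOURCE A (Python) =====
-- import itertools
--
-- def read_seqs(seq, ints): # separated to limit indentation
--     seqs = []
--     current = ""
--     bpts = list(itertools.chain.from_iterable(ints))
--     write = False
--     for i, c in enumerate(seq): # todo: what indexing in Phobius
--         if (i + 1) in bpts:
--             write = not write # start/stop reading sequence
--             if not write: # save and reset at the end of sequence
--                 seqs.append(current)
--                 current = ""
--         if write:
--             current += c
--     return seqs
-- ===== SOURCE B (Python) =====
-- def read_seqs(seq, ints):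
--     n = len(seq)
--     positions = sorted({p for row in ints for p in row if 1 <= p <= n})
--     seqs = []
--     while len(positions) >= 2:
--         start, stop = positions[0], positions[1]
--         seqs.append(seq[start - 1:stop - 1])
--         positions = positions[2:]
--     return seqs
-- ===== Notes on version B (the rewrite author's own statement) =====
-- stated objective: faster
-- what changed: Replaces A's per-character scan with an 'in'-list membership test at every index by building the sorted set of in-range breakpoints once and slicing the string at consecutive pairs of them.
import Mathlib
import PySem

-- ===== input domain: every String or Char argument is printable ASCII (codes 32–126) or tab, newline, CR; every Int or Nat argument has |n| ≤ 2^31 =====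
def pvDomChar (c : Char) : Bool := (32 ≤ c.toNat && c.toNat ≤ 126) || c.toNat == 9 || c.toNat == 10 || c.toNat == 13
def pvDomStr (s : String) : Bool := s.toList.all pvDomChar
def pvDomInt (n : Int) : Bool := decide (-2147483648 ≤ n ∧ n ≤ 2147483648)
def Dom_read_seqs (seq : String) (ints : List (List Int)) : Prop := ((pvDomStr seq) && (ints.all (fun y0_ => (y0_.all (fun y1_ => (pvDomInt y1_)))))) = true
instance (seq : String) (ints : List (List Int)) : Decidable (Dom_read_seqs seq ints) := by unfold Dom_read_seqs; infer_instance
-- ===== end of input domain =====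

-- B replaces A's toggle-and-accumulate character scan (with its per-index 'in bpts' list
-- scan) by sorting the distinct in-range breakpoints once and slicing the string at
-- consecutive pairs (objective: faster, measured).

-- ===== PORT A =====
-- the 'for i, c in enumerate(seq)' loop: structural recursion over the characters,
-- carrying the 0-based index i and the state (seqs, current, write)
def readLoopA (bpts : List Int) (seqs : List (List Char)) (current : List Char)
    (write : Bool) (i : Nat) : List Char → List (List Char)
  | [] => seqs
  | c :: rest =>
    if ((i : Int) + 1) ∈ bpts then
      if write then
        -- write := not write = false; append current, reset; write is false so c is not kept
        readLoopA bpts (seqs ++ [current]) [] false (i + 1) rest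
      else
        -- write := not write = true; then 'if write: current += c'
        readLoopA bpts seqs (current ++ [c]) true (i + 1) rest
    else
      if write then
        readLoopA bpts seqs (current ++ [c]) true (i + 1) rest
      else
        readLoopA bpts seqs current false (i + 1) rest

def read_seqs (seq : String) (ints : List (List Int)) : List String :=
  -- bpts = list(itertools.chain.from_iterable(ints)) = ints.flatten
  (readLoopA ints.flatten [] [] false 0 seq.toList).map String.ofList

-- ===== PORT B =====
-- the 'while len(positions) >= 2' loop: consume positions two at a time, slicing seq
def pairLoopB (cs : List Char) (seqs : List (List Char)) : List Int → List (List Char)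
  | a :: b :: rest =>
      pairLoopB cs (seqs ++ [PySem.List.slice cs (some (a - 1)) (some (b - 1))]) rest
  | _ => seqs

def read_seqs_alt (seq : String) (ints : List (List Int)) : List String :=
  -- positions = sorted({p for row in ints for p in row if 1 <= p <= len(seq)})
  (pairLoopB seq.toList []
    (PySem.List.sorted
      (PySem.Set.ofList (ints.flatten.filter
        (fun p => decide (1 ≤ p) && decide (p ≤ (seq.toList.length : Int)))))
      (fun x => x) false)).map String.ofList

-- ===== PRECONDITION & SPEC =====
def Spec_read_seqs (seq : String) (ints : List (List Int)) (out : List String) : Prop := out = read_seqs_alt seq ints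
instance (seq : String) (ints : List (List Int)) (out : List String) : Decidable (Spec_read_seqs seq ints out) := by unfold Spec_read_seqs; infer_instance

-- ===== CLAIM (what is proved, stated in full; the proofs are below) =====
def Claim_equal_read_seqs : Prop := ∀ (seq : String) (ints : List (List Int)), Dom_read_seqs seq ints → Spec_read_seqs seq ints (read_seqs seq ints)

-- ===== LEMMAS AND PROOFS =====

-- proof-side characterisation: slices of cs at consecutive pairs of positions
def extractI (i : Nat) (cs : List Char) : List Int → List (List Char)
  | a :: b :: rest => ((cs.drop (a - 1 - (i : Int)).toNat).take (b - a).toNat) :: extractI i cs rest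
  | _ => []

theorem loopA_congr (cs : List Char) : ∀ (i : Nat) (bp1 bp2 : List Int)
    (seqs : List (List Char)) (cur : List Char) (w : Bool),
    (∀ j : Nat, i < j → j ≤ i + cs.length → (((j : Int)) ∈ bp1 ↔ ((j : Int)) ∈ bp2)) →
    readLoopA bp1 seqs cur w i cs = readLoopA bp2 seqs cur w i cs := by
  induction cs with
  | nil => intro i bp1 bp2 seqs cur w _; simp [readLoopA]
  | cons c rest ih =>
    intro i bp1 bp2 seqs cur w h
    have hq : (((i : Int)) + 1 ∈ bp1) ↔ (((i : Int)) + 1 ∈ bp2) := by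
      have := h (i + 1) (by omega) (by simp)
      simpa using this
    have h' : ∀ j : Nat, i + 1 < j → j ≤ (i + 1) + rest.length →
        (((j : Int)) ∈ bp1 ↔ ((j : Int)) ∈ bp2) := by
      intro j hj1 hj2; exact h j (by omega) (by simp; omega)
    simp only [readLoopA]
    by_cases hm : ((i : Int) + 1) ∈ bp1
    · have hm2 : ((i : Int) + 1) ∈ bp2 := hq.mp hm
      simp only [if_pos hm, if_pos hm2]
      cases w <;> simp <;> exact ih _ _ _ _ _ _ h'
    · have hm2 : ((i : Int) + 1) ∉ bp2 := fun h2 => hm (hq.mpr h2)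
      simp only [if_neg hm, if_neg hm2]
      cases w <;> simp <;> exact ih _ _ _ _ _ _ h'

theorem extractI_shift (c : Char) (cs : List Char) : ∀ (i : Nat) (ps : List Int),
    (∀ p ∈ ps, (i : Int) + 1 < p) →
    extractI i (c :: cs) ps = extractI (i + 1) cs ps
  | i, [] => by intro _; simp [extractI]
  | i, [a] => by intro _; simp [extractI]
  | i, a :: b :: rest => by
    intro h
    have ha : (i : Int) + 1 < a := h a (by simp)
    have hdrop : (a - 1 - (i : Int)).toNat = (a - 1 - ((i : Nat) + 1 : Nat)).toNat + 1 := by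
      push_cast; omega
    simp only [extractI, hdrop, List.drop_succ_cons]
    exact congrArg _ (extractI_shift c cs i rest (fun p hp => h p (by simp [hp])))

-- the minimum of a strictly sorted list is its head
theorem head_eq_of_mem_min (ps : List Int) (x : Int)
    (hpw : ps.Pairwise (· < ·)) (hx : x ∈ ps) (hlb : ∀ p ∈ ps, x ≤ p) :
    ∃ rest, ps = x :: rest ∧ ∀ p ∈ rest, x < p := by
  cases ps with
  | nil => cases hx
  | cons h t =>
    have hht := List.pairwise_cons.mp hpw
    rcases List.mem_cons.mp hx with he | ht'
    · subst he; exact ⟨t, rfl, hht.1⟩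
    · have h1 : h < x := hht.1 x ht'
      have h2 : x ≤ h := hlb h (by simp)
      omega

-- what A's loop produces from an arbitrary reachable state
def rhsA (i : Nat) (cs : List Char) (ps : List Int) (seqs : List (List Char))
    (cur : List Char) : Bool → List (List Char)
  | false => seqs ++ extractI i cs ps
  | true =>
    match ps with
    | [] => seqs
    | b :: rest => seqs ++ (cur ++ cs.take (b - 1 - (i : Int)).toNat) :: extractI i cs rest

theorem loopA_main (cs : List Char) : ∀ (i : Nat) (ps : List Int)
    (seqs : List (List Char)) (cur : List Char) (w : Bool),
    ps.Pairwise (· < ·) →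
    (∀ p ∈ ps, (i : Int) < p ∧ p ≤ (i : Int) + cs.length) →
    (w = false → cur = []) →
    readLoopA ps seqs cur w i cs = rhsA i cs ps seqs cur w := by
  induction cs with
  | nil =>
    intro i ps seqs cur w hpw hbd hcur
    have hps : ps = [] := by
      cases ps with
      | nil => rfl
      | cons p t => have := hbd p (by simp); simp at this; omega
    subst hps
    cases w <;> simp [readLoopA, rhsA, extractI]
  | cons c cs' ih =>
    intro i ps seqs cur w hpw hbd hcur
    by_cases hm : ((i : Int) + 1) ∈ ps
    · obtain ⟨rest, hps, hrest⟩ := head_eq_of_mem_min ps ((i : Int) + 1) hpw hm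
        (fun p hp => by have := (hbd p hp).1; omega)
      subst hps
      have hpw' : rest.Pairwise (· < ·) := (List.pairwise_cons.mp hpw).2
      have hbd' : ∀ p ∈ rest, ((i + 1 : Nat) : Int) < p ∧ p ≤ ((i + 1 : Nat) : Int) + cs'.length := by
        intro p hp
        have h2 := (hbd p (by simp [hp])).2
        have h1 := hrest p hp
        simp only [List.length_cons] at h2
        push_cast at *
        constructor <;> omega
      have hcong : ∀ (seqs2 : List (List Char)) (cur2 : List Char) (w2 : Bool),
          readLoopA (((i : Int) + 1) :: rest) seqs2 cur2 w2 (i + 1) cs'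
            = readLoopA rest seqs2 cur2 w2 (i + 1) cs' := by
        intro seqs2 cur2 w2
        apply loopA_congr
        intro j hj1 hj2
        simp only [List.mem_cons]
        constructor
        · rintro (he | h')
          · exfalso; omega
          · exact h'
        · intro h'; right; exact h'
      cases w with
      | true =>
        simp only [readLoopA, if_pos hm]
        rw [hcong, ih (i + 1) rest (seqs ++ [cur]) [] false hpw' hbd' (fun _ => rfl)]
        have h0 : ((i : Int) + 1 - 1 - (i : Int)).toNat = 0 := by omega
        simp only [rhsA, h0, List.take_zero, List.append_nil]
        rw [extractI_shift c cs' (i := i) rest hrest]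
        simp
      | false =>
        have hc : cur = [] := hcur rfl
        subst hc
        simp only [readLoopA, if_pos hm]
        rw [if_neg (by simp : ¬(false = true))]
        simp only [List.nil_append]
        rw [hcong, ih (i + 1) rest seqs [c] true hpw' hbd' (by simp)]
        cases rest with
        | nil => simp [rhsA, extractI]
        | cons b rest' =>
          have hb : (i : Int) + 1 < b := hrest b (by simp)
          have hd : ((i : Int) + 1 - 1 - (i : Int)).toNat = 0 := by omega
          have ht : (b - ((i : Int) + 1)).toNat = (b - 1 - ((i + 1 : Nat) : Int)).toNat + 1 := by
            push_cast; omega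
          simp only [rhsA, extractI, hd, List.drop_zero, ht, List.take_succ_cons]
          rw [extractI_shift c cs' (i := i) rest' (fun p hp => hrest p (by simp [hp]))]
          simp
    · have hgt : ∀ p ∈ ps, (i : Int) + 1 < p := by
        intro p hp
        have h1 := (hbd p hp).1
        have hne : p ≠ (i : Int) + 1 := fun he => hm (he ▸ hp)
        omega
      have hbd' : ∀ p ∈ ps, ((i + 1 : Nat) : Int) < p ∧ p ≤ ((i + 1 : Nat) : Int) + cs'.length := by
        intro p hp
        have h2 := (hbd p hp).2
        have h1 := hgt p hp
        simp only [List.length_cons] at h2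
        push_cast at *
        constructor <;> omega
      cases w with
      | false =>
        have hc : cur = [] := hcur rfl
        subst hc
        simp only [readLoopA, if_neg hm]
        rw [if_neg (by simp : ¬(false = true))]
        rw [ih (i + 1) ps seqs [] false hpw hbd' (fun _ => rfl)]
        simp only [rhsA]
        rw [extractI_shift c cs' (i := i) ps hgt]
      | true =>
        simp only [readLoopA, if_neg hm]
        rw [ih (i + 1) ps seqs (cur ++ [c]) true hpw hbd' (by simp)]
        cases ps with
        | nil => simp [rhsA]
        | cons b rest =>
          have hb : (i : Int) + 1 < b := hgt b (by simp)
          have ht : (b - 1 - (i : Int)).toNat = (b - 1 - ((i + 1 : Nat) : Int)).toNat + 1 := by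
            push_cast; omega
          simp only [rhsA, ht, List.take_succ_cons]
          rw [extractI_shift c cs' (i := i) rest (fun p hp => hgt p (by simp [hp]))]
          simp

theorem pairLoopB_eq (cs : List Char) : ∀ (ps : List Int),
    ps.Pairwise (· < ·) → (∀ p ∈ ps, 1 ≤ p) →
    ∀ seqs, pairLoopB cs seqs ps = seqs ++ extractI 0 cs ps
  | [] => by intro _ _ seqs; simp [pairLoopB, extractI]
  | [a] => by intro _ _ seqs; simp [pairLoopB, extractI]
  | a :: b :: rest => by
    intro hpw hpos seqs
    have h1 : (1 : Int) ≤ a := hpos a (by simp)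
    have hab : a < b := by
      have := (List.pairwise_cons.mp hpw).1 b (by simp); exact this
    have hslice : PySem.List.slice cs (some (a - 1)) (some (b - 1)) =
        (cs.drop (a - 1 - ((0 : Nat) : Int)).toNat).take (b - a).toNat := by
      have e1 : (a - 1 - ((0 : Nat) : Int)).toNat = (a - 1).toNat := by omega
      have e2 : (b - a).toNat = (b - 1).toNat - (a - 1).toNat := by omega
      rw [e1, e2]
      apply PySem.List.slice_toNat <;> omega
    have ih := pairLoopB_eq cs rest (List.Pairwise.sublist (by simp) hpw)
      (fun p hp => hpos p (by simp [hp])) (seqs ++ [PySem.List.slice cs (some (a - 1)) (some (b - 1))])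
    simp only [pairLoopB, extractI]
    rw [ih, ← hslice]
    simp

-- ===== VERDICT (by name: the statement is the Claim_ definition above) =====
theorem read_seqs_spec : Claim_equal_read_seqs := by
  intro seq ints _
  unfold Spec_read_seqs read_seqs read_seqs_alt
  have hpw : (PySem.List.sorted
      (PySem.Set.ofList (ints.flatten.filter
        (fun p => decide (1 ≤ p) && decide (p ≤ (seq.toList.length : Int)))))
      (fun x => x) false).Pairwise (· < ·) :=
    PySem.List.sorted_ofList_pairwise_lt _
  have hmem : ∀ x : Int, x ∈ (PySem.List.sorted
      (PySem.Set.ofList (ints.flatten.filter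
        (fun p => decide (1 ≤ p) && decide (p ≤ (seq.toList.length : Int)))))
      (fun x => x) false) ↔ (x ∈ ints.flatten ∧ 1 ≤ x ∧ x ≤ (seq.toList.length : Int)) := by
    intro x
    simp [PySem.List.mem_sorted, PySem.Set.mem_ofList, List.mem_filter]
    tauto
  have hbd : ∀ p ∈ (PySem.List.sorted
      (PySem.Set.ofList (ints.flatten.filter
        (fun p => decide (1 ≤ p) && decide (p ≤ (seq.toList.length : Int)))))
      (fun x => x) false), ((0 : Nat) : Int) < p ∧ p ≤ ((0 : Nat) : Int) + seq.toList.length := by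
    intro p hp
    have := (hmem p).mp hp
    push_cast
    omega
  rw [loopA_congr seq.toList 0 ints.flatten _ [] [] false
      (by
        intro j hj1 hj2
        rw [hmem (j : Int)]
        constructor
        · intro h; exact ⟨h, by omega, by push_cast at *; omega⟩
        · intro h; exact h.1)]
  rw [loopA_main seq.toList 0 _ [] [] false hpw hbd (fun _ => rfl)]
  rw [pairLoopB_eq seq.toList _ hpw (fun p hp => ((hmem p).mp hp).2.1) []]
  simp [rhsA]
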